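-- pv_equiv track=rewrite | github.com/morteza89/MCP-AI-Agents | MCP-AI-Agent-Blender/local_mcp_server_with_llm.py | _detect_house_intent
-- ===== SOURCE A (Python) =====
-- def _detect_house_intent(prompt: str) -> bool:
--     p = (prompt or "").lower()
--     keywords = [
--         "house", "home", "building", "room", "villa", "cottage", "hut",
--         "cabin", "apartment", "flat", "bungalow", "residence", "dwelling",
--         "shelter", "roof", "walls"
--     ]
--     return any(k in p for k in keywords)
-- ===== SOURCE B (Python) =====
-- _KEYWORDS = [
--     "house", "home", "building", "room", "villa", "cottage", "hut",
--     "cabin", "apartment", "flat", "bungalow", "residence", "dwelling",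
--     "shelter", "roof", "walls"
-- ]
--
-- # Dispatch table: first character -> the keywords starting with it, built once.
-- _BY_FIRST = {}
-- for _first, _k in ((k[0], k) for k in _KEYWORDS):
--     _BY_FIRST.setdefault(_first, []).append(_k)
--
--
-- def _detect_house_intent(prompt: str) -> bool:
--     p = (prompt or "").lower()
--     # Single left-to-right pass: at each position only the keywords whose
--     # first character matches p[i] are tested, via the dispatch table.
--     for i in range(len(p)):
--         for k in _BY_FIRST.get(p[i], ()):
--             if p.startswith(k, i):
--                 return True
--     return False
-- ===== Notes on version B (the rewrite author's own statement) =====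
-- stated objective: alternative
-- what changed: Replaces A's keyword-major any(k in p) — 16 independent whole-string substring scans — with a first-character dispatch table (dict char -> keywords) built once and a single left-to-right pass over positions of the lowered prompt, testing only the keywords bucketed under the current character.
import Mathlib
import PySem

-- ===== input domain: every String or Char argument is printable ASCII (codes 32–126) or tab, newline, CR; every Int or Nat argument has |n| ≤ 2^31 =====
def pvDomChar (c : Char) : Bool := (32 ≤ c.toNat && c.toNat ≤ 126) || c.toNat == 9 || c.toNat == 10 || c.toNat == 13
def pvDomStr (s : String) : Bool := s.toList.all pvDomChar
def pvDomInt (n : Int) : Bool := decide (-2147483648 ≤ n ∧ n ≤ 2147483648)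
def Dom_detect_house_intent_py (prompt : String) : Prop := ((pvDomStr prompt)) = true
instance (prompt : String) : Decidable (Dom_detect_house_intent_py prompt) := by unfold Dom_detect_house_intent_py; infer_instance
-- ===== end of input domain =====

-- B replaces A's 16 independent whole-string substring scans by a first-character
-- dispatch table and ONE left-to-right pass over the prompt (objective: alternative).

-- ===== PORT A =====
def houseKeywords : List String :=
  ["house", "home", "building", "room", "villa", "cottage", "hut",
   "cabin", "apartment", "flat", "bungalow", "residence", "dwelling",
   "shelter", "roof", "walls"]

-- `(prompt or "")` is the identity on strings (the empty string stays empty).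
def detect_house_intent_py (prompt : String) : Bool :=
  let p := PySem.Str.lower prompt
  houseKeywords.any (fun k => PySem.Str.isIn k p)

-- ===== PORT B =====
-- _BY_FIRST: first character -> keywords starting with it (k[0] on the nonempty literals).
def houseIndex : PySem.Dict Char (List String) :=
  (houseKeywords.map (fun k => (k.toList.headD ' ', k))).foldl
    (fun d p => d.modify p.1 [] (· ++ [p.2])) PySem.Dict.empty

-- the position loop: `for i in range(len(p))` walked as the suffix p.drop i;
-- `p.startswith(k, i)` is `startswith (p.drop i) k`.
def houseScanB (idx : PySem.Dict Char (List String)) : List Char → Bool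
  | [] => false
  | c :: t =>
    if (idx.getD c []).any (fun k => PySem.Chars.startswith (c :: t) k.toList) then true
    else houseScanB idx t

def detect_house_intent_py_alt (prompt : String) : Bool :=
  houseScanB houseIndex (PySem.Str.lower prompt).toList

-- ===== PRECONDITION & SPEC =====
def Spec_detect_house_intent_py (prompt : String) (out : Bool) : Prop := out = detect_house_intent_py_alt prompt
instance (prompt : String) (out : Bool) : Decidable (Spec_detect_house_intent_py prompt out) := by unfold Spec_detect_house_intent_py; infer_instance

-- ===== CLAIM (what is proved, stated in full; the proofs are below) =====
def Claim_equal_detect_house_intent_py : Prop := ∀ (prompt : String), Dom_detect_house_intent_py prompt → Spec_detect_house_intent_py prompt (detect_house_intent_py prompt)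

-- ===== LEMMAS AND PROOFS =====

-- The bucket under c is exactly the keywords whose first character is c.
theorem houseIndex_getD (c : Char) :
    houseIndex.getD c [] = houseKeywords.filter (fun k => k.toList.headD ' ' == c) := by
  rw [houseIndex, PySem.Dict.getD_foldl_modify_append, PySem.Dict.getD_empty]
  rw [List.filter_map, List.map_map]
  simp [Function.comp_def]

-- Testing the bucket at position c is testing all keywords there (keywords are nonempty).
theorem bucket_any_eq (c : Char) (t : List Char) :
    (houseIndex.getD c []).any (fun k => PySem.Chars.startswith (c :: t) k.toList)
      = houseKeywords.any (fun k => k.toList.isPrefixOf (c :: t)) := by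
  rw [houseIndex_getD, List.any_filter, Bool.eq_iff_iff, List.any_eq_true, List.any_eq_true]
  refine ⟨fun ⟨k, hk, hp⟩ => ⟨k, hk, ?_⟩, fun ⟨k, hk, hp⟩ => ⟨k, hk, ?_⟩⟩ <;>
  · have hne : k.toList ≠ [] := by fin_cases hk <;> decide
    obtain ⟨h, r, e⟩ := List.exists_cons_of_ne_nil hne
    revert hp
    simp only [Bool.and_eq_true, PySem.Chars.startswith_iff, List.isPrefixOf_iff_prefix, e,
      List.cons_prefix_cons, beq_iff_eq, List.headD_cons]
    tauto

-- The dispatch-table scan decides "some keyword is an infix".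
theorem houseScanB_eq_true_iff (s : List Char) :
    houseScanB houseIndex s = true ↔ ∃ k ∈ houseKeywords, k.toList <:+: s := by
  induction s with
  | nil => simp only [houseScanB]; decide
  | cons a t ih =>
      rw [houseScanB, bucket_any_eq]
      by_cases h : houseKeywords.any (fun k => k.toList.isPrefixOf (a :: t)) = true
      · rw [if_pos h]
        obtain ⟨k, hk, hp⟩ := List.any_eq_true.mp h
        exact ⟨fun _ => ⟨k, hk, (List.isPrefixOf_iff_prefix.mp hp).isInfix⟩, fun _ => rfl⟩
      · rw [if_neg h, ih]
        constructor
        · rintro ⟨k, hk, hinf⟩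
          exact ⟨k, hk, hinf.trans (List.suffix_cons a t).isInfix⟩
        · rintro ⟨k, hk, hinf⟩
          rcases List.infix_cons_iff.mp hinf with hpre | hinf'
          · exact absurd (List.any_eq_true.mpr
              ⟨k, hk, List.isPrefixOf_iff_prefix.mpr hpre⟩) h
          · exact ⟨k, hk, hinf'⟩

-- ===== VERDICT (by name: the statement is the Claim_ definition above) =====
theorem detect_house_intent_py_spec : Claim_equal_detect_house_intent_py := by
  intro prompt _
  unfold Spec_detect_house_intent_py detect_house_intent_py detect_house_intent_py_alt
  rw [Bool.eq_iff_iff, houseScanB_eq_true_iff]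
  simp only [List.any_eq_true, PySem.Str.isIn_iff_infix]
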